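-- pv_equiv track=rewrite | github.com/micmetta/Esame-Teconologie-del-Linguaggio-Naturale | Progetti_esame/Di Caro/Esercitazione 7 - Plagiarism Detection Code/Esercitazione 7 - Plagiarism Detection Code/Plagiarism detection code.py | get_commenti_singola_riga
-- ===== SOURCE A (Python) =====
-- def get_commenti_singola_riga(file):
--     commenti = []
--     for istruzione_corrente in file:
--         for i in range(0, len(istruzione_corrente)):
--             if (istruzione_corrente[i] == "#"):
--                 # allora vuol dire che dalla parola successiva c'è sicuramente il commento:
--                 if(i < len(istruzione_corrente)-1): #devo essere sicuro che dopo # ci sia un qualcosa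
--                     for j in range(i+1, len(istruzione_corrente)):
--                         commenti.append(istruzione_corrente[j]) #aggiungo il commento alla lista commenti.
--
--     return commenti
-- ===== SOURCE B (Python) =====
-- def _comments_of(line):
--     # recursion on the list structure: the first "#" contributes the whole rest,
--     # later "#"s are handled by the recursive call on the rest
--     if not line:
--         return []
--     head, rest = line[0], line[1:]
--     tail = _comments_of(rest)
--     return rest + tail if head == "#" else tail
--
--
-- def get_commenti_singola_riga(file):
--     commenti = []
--     for line in file:
--         commenti.extend(_comments_of(line))
--     return commenti
-- ===== Notes on version B (the rewrite author's own statement) =====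
-- stated objective: alternative
-- what changed: Replaces A's index loops (scan for '#', guard i<len-1, inner index loop copying the suffix) with a structural recursion per line in which the first '#' contributes the rest of the line and later '#'s are covered by the recursive result on the rest.
import Mathlib
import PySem

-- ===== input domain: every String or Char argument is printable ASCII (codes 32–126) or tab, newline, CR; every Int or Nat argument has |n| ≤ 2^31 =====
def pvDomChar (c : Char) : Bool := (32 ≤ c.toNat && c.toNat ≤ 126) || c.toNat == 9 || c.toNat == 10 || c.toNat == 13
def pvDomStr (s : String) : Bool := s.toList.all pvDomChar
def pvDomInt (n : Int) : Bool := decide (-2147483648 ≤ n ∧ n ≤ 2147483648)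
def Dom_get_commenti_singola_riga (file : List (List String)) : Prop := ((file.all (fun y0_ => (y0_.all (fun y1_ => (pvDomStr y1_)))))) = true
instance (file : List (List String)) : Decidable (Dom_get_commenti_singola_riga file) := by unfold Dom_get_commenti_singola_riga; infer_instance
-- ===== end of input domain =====

-- B differs from A by decomposition only (structural recursion per line instead of index loops); same results.

-- ===== PORT A =====
def get_commenti_singola_riga (file : List (List String)) : List String :=
  file.foldl (fun commenti istruzione_corrente =>
    (PySem.List.pyRange 0 (PySem.List.len istruzione_corrente) 1).foldl (fun commenti i =>
      if PySem.List.pyGetD istruzione_corrente i "" == "#" then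
        if i < PySem.List.len istruzione_corrente - 1 then
          (PySem.List.pyRange (i + 1) (PySem.List.len istruzione_corrente) 1).foldl
            (fun commenti j => commenti ++ [PySem.List.pyGetD istruzione_corrente j ""]) commenti
        else commenti
      else commenti) commenti) []

-- ===== PORT B =====
def pvCommentsOf : List String → List String
  | [] => []
  | head :: rest => if head == "#" then rest ++ pvCommentsOf rest else pvCommentsOf rest

def get_commenti_singola_riga_alt (file : List (List String)) : List String :=
  file.foldl (fun commenti line => commenti ++ pvCommentsOf line) []

-- ===== PRECONDITION & SPEC =====
def Spec_get_commenti_singola_riga (file : List (List String)) (out : List String) : Prop := out = get_commenti_singola_riga_alt file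
instance (file : List (List String)) (out : List String) : Decidable (Spec_get_commenti_singola_riga file out) := by unfold Spec_get_commenti_singola_riga; infer_instance

-- ===== CLAIM (what is proved, stated in full; the proofs are below) =====
def Claim_equal_get_commenti_singola_riga : Prop := ∀ (file : List (List String)), Dom_get_commenti_singola_riga file → Spec_get_commenti_singola_riga file (get_commenti_singola_riga file)

-- ===== LEMMAS AND PROOFS =====

-- A's inner index loop starting at index a equals acc ++ pvCommentsOf (line.drop a)
theorem pv_inner_eq (ln : List String) : ∀ (k : Nat) (a : Nat) (acc : List String),
    a + k = ln.length →
    (PySem.List.pyRange (a : Int) (PySem.List.len ln) 1).foldl (fun commenti i =>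
      if PySem.List.pyGetD ln i "" == "#" then
        if i < PySem.List.len ln - 1 then
          (PySem.List.pyRange (i + 1) (PySem.List.len ln) 1).foldl
            (fun commenti j => commenti ++ [PySem.List.pyGetD ln j ""]) commenti
        else commenti
      else commenti) acc = acc ++ pvCommentsOf (ln.drop a) := by
  intro k
  induction k with
  | zero =>
      intro a acc ha
      rw [PySem.List.pyRange_one_eq_nil (by simp; omega)]
      rw [List.drop_of_length_le (by omega)]
      simp [pvCommentsOf]
  | succ n ih =>
      intro a acc ha
      have halt : a < ln.length := by omega
      rw [PySem.List.pyRange_one_cons (by simp; omega)]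
      simp only [List.foldl_cons]
      have hget : PySem.List.pyGetD ln ((a : Nat) : Int) "" = ln.getD a "" :=
        PySem.List.pyGetD_natCast ln a ""
      have hdrop : ln.drop a = ln.getD a "" :: ln.drop (a + 1) := by
        rw [List.drop_eq_getElem_cons halt, List.getD_eq_getElem?_getD,
          List.getElem?_eq_getElem halt]
        rfl
      have hinner : ∀ (acc' : List String),
          (PySem.List.pyRange ((a : Int) + 1) (PySem.List.len ln) 1).foldl
            (fun commenti j => commenti ++ [PySem.List.pyGetD ln j ""]) acc'
          = acc' ++ ln.drop (a + 1) := by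
        intro acc'
        have h := PySem.List.foldl_pyRange_pyGetD ln "" (fun c x => c ++ [x]) acc'
          (a := (a : Int) + 1) (by omega)
        rw [PySem.List.foldl_append_singleton] at h
        simpa only [show (((a : Int) + 1).toNat) = a + 1 from by omega] using h
      rw [hget]
      have hcast : ((a : Int) + 1) = ((a + 1 : Nat) : Int) := by push_cast; ring
      by_cases hhash : ln.getD a "" = "#"
      · simp only [hhash, beq_self_eq_true, if_true]
        by_cases hlast : (a : Int) < PySem.List.len ln - 1
        · rw [if_pos hlast, hinner, hcast, ih (a + 1) _ (by omega)]
          rw [hdrop]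
          have hhash' : ln[a]?.getD "" = "#" := by
            rwa [List.getD_eq_getElem?_getD] at hhash
          simp [pvCommentsOf, hhash']
        · rw [if_neg hlast]
          rw [hcast, ih (a + 1) _ (by omega), hdrop]
          have h1 : ln.drop (a + 1) = [] :=
            List.drop_of_length_le (by simp at hlast; omega)
          have hhash' : ln[a]?.getD "" = "#" := by
            rwa [List.getD_eq_getElem?_getD] at hhash
          simp [pvCommentsOf, hhash', h1]
      · rw [if_neg (by simpa using hhash), hcast, ih (a + 1) _ (by omega), hdrop]
        have hhash' : ¬ ln[a]?.getD "" = "#" := by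
          rwa [List.getD_eq_getElem?_getD] at hhash
        simp [pvCommentsOf, hhash']

theorem pv_line_eq (ln : List String) (acc : List String) :
    (PySem.List.pyRange 0 (PySem.List.len ln) 1).foldl (fun commenti i =>
      if PySem.List.pyGetD ln i "" == "#" then
        if i < PySem.List.len ln - 1 then
          (PySem.List.pyRange (i + 1) (PySem.List.len ln) 1).foldl
            (fun commenti j => commenti ++ [PySem.List.pyGetD ln j ""]) commenti
        else commenti
      else commenti) acc = acc ++ pvCommentsOf ln := by
  have := pv_inner_eq ln ln.length 0 acc (by omega)
  simpa using this

-- ===== VERDICT (by name: the statement is the Claim_ definition above) =====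
theorem get_commenti_singola_riga_spec : Claim_equal_get_commenti_singola_riga := by
  intro file _
  unfold Spec_get_commenti_singola_riga get_commenti_singola_riga get_commenti_singola_riga_alt
  induction file using List.reverseRecOn with
  | nil => rfl
  | append_singleton xs x ih => simp only [List.foldl_append, List.foldl_cons, List.foldl_nil, pv_line_eq]
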